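-- pv_equiv track=rewrite | github.com/danilocesar1002/sort-tests | tex_structs.py | TeXQuickSort
-- ===== SOURCE A (Python) =====
-- def finalString(procedure):
--     return "\n\n".join(["\\begin{{figure}}[H]\n\\centering\n{}\n\n({})\n\\end{{figure}}".format(procedure[i], i + 1) for i in range(len(procedure))])
--
-- def TeXPartitionString(arr, i, j, left, right):
--     assert len(arr) > 0
--     colors = [None for _ in range(len(arr))]
--
--     if j == right + 1:
--         for k in range(len(arr)):
--             if left > k or k > right:
--                 colors[k] = "yellow!30"
--             elif left <= k < i:
--                 colors[k] = "green!30"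
--             elif k == i and not i == j == -1:
--                 colors[k] = "gray!30"
--             elif i < k <= right:
--                 colors[k] = "red!30"
--             else:
--                 colors[k] = "white"
--     else:
--         for k in range(len(arr)):
--             if   k == right and not i == j == -1:
--                 colors[k] = "gray!30"
--             elif left > k or k > right:
--                 colors[k] = "yellow!30"
--             elif left <= k <= i:
--                 colors[k] = "green!30"
--             elif i < k <= j:
--                 colors[k] = "red!30"
--             else:
--                 colors[k] = "white"
--
--
--     string = "\\begin{{tabular}}{{{}}}\n\\hline\n".format("|l"*len(arr) + "|")
--
--     for k in range(len(arr)):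
--         string += "\\cellcolor{{{}}}{} &\n".format(colors[k], arr[k])
--
--     string = string[:-2] +  "\\\\ \n\\hline\n"
--     string += "\\end{tabular}"
--
--     return string
--
-- def TeXPartition(arr, left, right):
--     procedure = [TeXPartitionString(arr,-1,-1, left, right)]
--
--     x = arr[right]
--     i = left - 1
--
--     for j in range(left, right):
--         if arr[j] <= x:
--             i += 1
--             arr[i], arr[j] = arr[j], arr[i]
--         procedure.append(TeXPartitionString(arr, i, j, left, right))
--
--     arr[i + 1], arr[right] = arr[right], arr[i + 1]
--     procedure.append(TeXPartitionString(arr, i + 1, right + 1, left, right))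
--
--     return (i + 1, procedure)
--
-- def TeXQuickSort(arr):
--     stack = [(0, len(arr) - 1)]
--     procedure = [TeXPartitionString(arr, -1, -1, 0, len(arr) - 1)]
--
--     while len(stack) > 0:
--         left, right = stack.pop()
--         pivot, subProcedure = TeXPartition(arr, left, right)
--
--         #procedure += subProcedure[1:]
--         procedure.append(subProcedure[-1])
--
--         if pivot + 1 < right:
--             stack.append((pivot + 1, right))
--         if left < pivot - 1:
--             stack.append((left, pivot - 1))
--
--     procedure.append(TeXPartitionString(arr, -1, -1, 0, len(arr) - 1))
--
--     return finalString(procedure)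
-- ===== SOURCE B (Python) =====
-- # B: renders only the states TeXQuickSort actually keeps (the all-white wrapper rows and
-- # each partition's final state), skipping A's per-step intermediate strings, and drives
-- # quicksort with a left-first recursive helper instead of the explicit stack.
-- # Like A, it sorts `arr` in place (mutation visible to the caller).
--
-- def finalString(procedure):
--     return "\n\n".join("\\begin{{figure}}[H]\n\\centering\n{}\n\n({})\n\\end{{figure}}".format(p, k)
--                        for k, p in enumerate(procedure, 1))
--
-- def TeXRow(arr, colors):
--     assert len(arr) > 0
--     cells = " &\n".join("\\cellcolor{{{}}}{}".format(c, v) for c, v in zip(colors, arr))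
--     return "\\begin{{tabular}}{{{}}}\n\\hline\n".format("|l" * len(arr) + "|") \
--         + cells + " \\\\ \n\\hline\n\\end{tabular}"
--
-- def TeXPlain(arr):
--     return TeXRow(arr, ["white"] * len(arr))
--
-- def TeXFinal(arr, pivot, left, right):
--     def color(k):
--         if k < left or k > right:
--             return "yellow!30"
--         if k < pivot:
--             return "green!30"
--         if k == pivot:
--             return "gray!30"
--         return "red!30"
--     return TeXRow(arr, [color(k) for k in range(len(arr))])
--
-- def partition(arr, left, right):
--     x = arr[right]
--     i = left - 1
--     for j in range(left, right):
--         if arr[j] <= x: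
--             i += 1
--             arr[i], arr[j] = arr[j], arr[i]
--     arr[i + 1], arr[right] = arr[right], arr[i + 1]
--     return i + 1
--
-- def TeXQuickSort(arr):
--     procedure = [TeXPlain(arr)]
--
--     def qs(left, right):
--         pivot = partition(arr, left, right)
--         procedure.append(TeXFinal(arr, pivot, left, right))
--         if left < pivot - 1:
--             qs(left, pivot - 1)
--         if pivot + 1 < right:
--             qs(pivot + 1, right)
--
--     qs(0, len(arr) - 1)
--     procedure.append(TeXPlain(arr))
--     return finalString(procedure)
-- ===== Notes on version B (the rewrite author's own statement) =====
-- stated objective: faster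
-- what changed: B renders only the states the output keeps - all-white wrapper rows and each partition's final state - so the partition routine does pure swaps with no string building (A renders a full LaTeX table after every comparison step and discards all but the last), and the explicit LIFO stack is replaced by a left-first recursive helper; rows are built with join/zip instead of += and slicing.
-- outside the precondition, e.g. on TeXQuickSort([]): A raises AssertionError, B raises AssertionError
import Mathlib
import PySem

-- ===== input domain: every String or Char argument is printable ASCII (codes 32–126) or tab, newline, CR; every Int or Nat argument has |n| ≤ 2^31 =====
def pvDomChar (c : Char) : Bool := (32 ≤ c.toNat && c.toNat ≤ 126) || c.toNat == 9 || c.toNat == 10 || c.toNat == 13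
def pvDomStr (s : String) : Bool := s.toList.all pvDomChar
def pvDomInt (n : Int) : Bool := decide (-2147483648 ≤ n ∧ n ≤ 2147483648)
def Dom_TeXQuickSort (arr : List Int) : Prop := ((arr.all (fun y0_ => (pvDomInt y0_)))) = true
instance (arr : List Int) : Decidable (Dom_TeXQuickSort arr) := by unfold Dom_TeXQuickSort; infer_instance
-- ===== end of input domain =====

-- B renders only the kept states (wrapper rows and each partition's final state), so its partition
-- does pure swaps with no string building, and replaces A's explicit stack with left-first recursion.
-- Both Pythons sort `arr` in place — the equivalence proved is about the return value.

-- ===== PORT A =====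

def finalStringP (procedure : List String) : String :=
  PySem.Str.join "\n\n" ((List.range procedure.length).map (fun (i : Nat) =>
    "\\begin{figure}[H]\n\\centering\n" ++ PySem.List.pyGetD procedure (i : Int) "" ++
      "\n\n(" ++ PySem.Int.toStr ((i : Int) + 1) ++ ")\n\\end{figure}"))

def texPartitionString (arr : List Int) (i j left right : Int) : String :=
  -- assert len(arr) > 0 : raises on arr = [], excluded by Pre_
  let n := arr.length
  let colors : List String :=
    if j = right + 1 then
      (List.range n).map (fun (k : Nat) =>
        if left > (k : Int) ∨ (k : Int) > right then "yellow!30"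
        else if left ≤ (k : Int) ∧ (k : Int) < i then "green!30"
        else if (k : Int) = i ∧ ¬(i = -1 ∧ j = -1) then "gray!30"
        else if i < (k : Int) ∧ (k : Int) ≤ right then "red!30"
        else "white")
    else
      (List.range n).map (fun (k : Nat) =>
        if (k : Int) = right ∧ ¬(i = -1 ∧ j = -1) then "gray!30"
        else if left > (k : Int) ∨ (k : Int) > right then "yellow!30"
        else if left ≤ (k : Int) ∧ (k : Int) ≤ i then "green!30"
        else if i < (k : Int) ∧ (k : Int) ≤ j then "red!30"
        else "white")
  let s0 : String :=
    "\\begin{tabular}{" ++ String.ofList (PySem.List.pyRepeat "|l".toList (n : Int)) ++ "|" ++ "}\n\\hline\n"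
  let s1 : String := (List.range n).foldl (fun (s : String) (k : Nat) =>
    s ++ "\\cellcolor{" ++ PySem.List.pyGetD colors (k : Int) "" ++ "}" ++
      PySem.Int.toStr (PySem.List.pyGetD arr (k : Int) 0) ++ " &\n") s0
  let s2 : String := PySem.Str.slice s1 none (some (-2)) ++ "\\\\ \n\\hline\n"
  s2 ++ "\\end{tabular}"

-- body of TeXPartition's for-loop (state: (arr, i, procedure))
def texPartStep (x left right : Int) (s : List Int × Int × List String) (j : Int) :
    List Int × Int × List String :=
  let a := s.1; let i := s.2.1; let p := s.2.2
  let (a', i') :=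
    if PySem.List.pyGetD a j 0 ≤ x then
      -- i += 1; arr[i], arr[j] = arr[j], arr[i]
      (PySem.List.pySetD (PySem.List.pySetD a (i + 1) (PySem.List.pyGetD a j 0)) j
         (PySem.List.pyGetD a (i + 1) 0), i + 1)
    else (a, i)
  (a', i', p ++ [texPartitionString a' i' j left right])

def texPartition (arr : List Int) (left right : Int) : Int × List Int × List String :=
  let proc0 : List String := [texPartitionString arr (-1) (-1) left right]
  let x := PySem.List.pyGetD arr right 0
  let st := (PySem.List.pyRange left right).foldl (texPartStep x left right) (arr, left - 1, proc0)
  let a := st.1; let i := st.2.1; let p := st.2.2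
  -- arr[i+1], arr[right] = arr[right], arr[i+1]
  let a' := PySem.List.pySetD (PySem.List.pySetD a (i + 1) (PySem.List.pyGetD a right 0)) right
              (PySem.List.pyGetD a (i + 1) 0)
  (i + 1, a', p ++ [texPartitionString a' (i + 1) (right + 1) left right])

-- fuel bound for A's while-loop (totality guard only: the loop pops at most this many times,
-- proved in texQSFuel_dec below; the fuel never runs out on any input)
def texQSFuel (stack : List (Int × Int)) : Nat :=
  (stack.map (fun e => 3 ^ ((e.2 - e.1 + 1).toNat))).sum

-- A's while-loop over the explicit stack (top of stack = head of the list)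
def texQSLoop : Nat → List (Int × Int) → List Int → List String → List Int × List String
  | 0, _, arr, proc => (arr, proc)          -- fuel exhausted: unreachable from TeXQuickSort
  | _ + 1, [], arr, proc => (arr, proc)
  | fuel + 1, (left, right) :: rest, arr, proc =>
      let t := texPartition arr left right
      let proc' := proc ++ [PySem.List.pyGetD t.2.2 (-1) ""]   -- subProcedure[-1]
      let push1 := if t.1 + 1 < right then [(t.1 + 1, right)] else []     -- pushed first
      let push2 := if left < t.1 - 1 then [(left, t.1 - 1)] else []       -- pushed second → on top
      texQSLoop fuel (push2 ++ push1 ++ rest) t.2.1 proc'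

def TeXQuickSort (arr : List Int) : String :=
  let st := texQSLoop (texQSFuel [((0 : Int), (arr.length : Int) - 1)])
    [((0 : Int), (arr.length : Int) - 1)] arr
    [texPartitionString arr (-1) (-1) 0 ((arr.length : Int) - 1)]
  finalStringP (st.2 ++ [texPartitionString st.1 (-1) (-1) 0 ((st.1.length : Int) - 1)])

-- ===== PORT B =====

def finalStringB (procedure : List String) : String :=
  PySem.Str.join "\n\n" ((PySem.List.enumerate procedure 1).map (fun kp =>
    "\\begin{figure}[H]\n\\centering\n" ++ kp.2 ++ "\n\n(" ++ PySem.Int.toStr kp.1 ++ ")\n\\end{figure}"))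

def texRow (arr : List Int) (colors : List String) : String :=
  -- assert len(arr) > 0 : raises on arr = [], excluded by Pre_
  "\\begin{tabular}{" ++ String.ofList (PySem.List.pyRepeat "|l".toList ((arr.length : Int))) ++ "|" ++ "}\n\\hline\n"
    ++ PySem.Str.join " &\n" ((colors.zip arr).map (fun cv =>
        "\\cellcolor{" ++ cv.1 ++ "}" ++ PySem.Int.toStr cv.2))
    ++ " \\\\ \n\\hline\n\\end{tabular}"

def texPlain (arr : List Int) : String :=
  texRow arr (PySem.List.pyRepeat ["white"] (arr.length : Int))

def texFinalColor (pivot left right : Int) (k : Nat) : String :=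
  if (k : Int) < left ∨ (k : Int) > right then "yellow!30"
  else if (k : Int) < pivot then "green!30"
  else if (k : Int) = pivot then "gray!30"
  else "red!30"

def texFinal (arr : List Int) (pivot left right : Int) : String :=
  texRow arr ((List.range arr.length).map (texFinalColor pivot left right))

-- partition: pure in-place swaps, no string building; state (arr, i); returns (arr', pivot)
def partStepB (x : Int) (s : List Int × Int) (j : Int) : List Int × Int :=
  if PySem.List.pyGetD s.1 j 0 ≤ x then
    (PySem.List.pySetD (PySem.List.pySetD s.1 (s.2 + 1) (PySem.List.pyGetD s.1 j 0)) j
       (PySem.List.pyGetD s.1 (s.2 + 1) 0), s.2 + 1)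
  else s

def partitionB (arr : List Int) (left right : Int) : List Int × Int :=
  let x := PySem.List.pyGetD arr right 0
  let st := (PySem.List.pyRange left right).foldl (partStepB x) (arr, left - 1)
  (PySem.List.pySetD (PySem.List.pySetD st.1 (st.2 + 1) (PySem.List.pyGetD st.1 right 0)) right
     (PySem.List.pyGetD st.1 (st.2 + 1) 0), st.2 + 1)

-- B's recursive qs: partition, record the final state, recurse left then right
-- (fuel = totality guard only: each call strictly shrinks (right-left).toNat)
def texQSRecB : Nat → Int → Int → List Int → List String → List Int × List String
  | 0, _, _, arr, proc => (arr, proc)       -- fuel exhausted: unreachable from TeXQuickSort_alt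
  | fuel + 1, left, right, arr, proc =>
      let t := partitionB arr left right
      let proc1 := proc ++ [texFinal t.1 t.2 left right]
      let st1 := if left < t.2 - 1 then texQSRecB fuel left (t.2 - 1) t.1 proc1 else (t.1, proc1)
      if t.2 + 1 < right then texQSRecB fuel (t.2 + 1) right st1.1 st1.2 else st1

def TeXQuickSort_alt (arr : List Int) : String :=
  let st := texQSRecB (((arr.length : Int) - 1).toNat + 1) 0 ((arr.length : Int) - 1) arr
    [texPlain arr]
  finalStringB (st.2 ++ [texPlain st.1])

-- ===== PRECONDITION & SPEC =====
-- Pre_ excludes only arr = []: there A's `assert len(arr) > 0` raises AssertionError (B's too)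
def Pre_TeXQuickSort (arr : List Int) : Prop := arr ≠ []
instance (arr : List Int) : Decidable (Pre_TeXQuickSort arr) := by unfold Pre_TeXQuickSort; infer_instance
def pvWitness_TeXQuickSort : List Int := [3, 1, 2]

def Spec_TeXQuickSort (arr : List Int) (out : String) : Prop := out = TeXQuickSort_alt arr
instance (arr : List Int) (out : String) : Decidable (Spec_TeXQuickSort arr out) := by unfold Spec_TeXQuickSort; infer_instance

-- ===== CLAIM (what is proved, stated in full; the proofs are below) =====
def Claim_equal_TeXQuickSort : Prop := ∀ (arr : List Int), Dom_TeXQuickSort arr → Pre_TeXQuickSort arr → Spec_TeXQuickSort arr (TeXQuickSort arr)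

-- ===== LEMMAS AND PROOFS =====

-- the two finalString decompositions agree
theorem finalStringB_eq (procedure : List String) : finalStringB procedure = finalStringP procedure := by
  unfold finalStringB finalStringP
  congr 1
  apply List.ext_getElem
  · simp [PySem.List.length_enumerate]
  · intro i h1 h2
    simp only [List.getElem_map, PySem.List.getElem_enumerate, List.getElem_range,
      PySem.List.pyGetD_natCast]
    rw [List.getD_eq_getElem _ _ (by simpa using h2), Int.add_comm]

theorem foldl_cells (n : Nat) (cf vf : Nat → String) : ∀ s0 : String,
    ((List.range n).foldl (fun (s : String) (k : Nat) =>
        s ++ "\\cellcolor{" ++ cf k ++ "}" ++ vf k ++ " &\n") s0).toList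
      = s0.toList ++ ((List.range n).map (fun (k : Nat) =>
          ("\\cellcolor{" ++ cf k ++ "}" ++ vf k).toList ++ " &\n".toList)).flatten := by
  induction n with
  | zero => intro s0; simp
  | succ n ih =>
    intro s0
    rw [List.range_succ, List.foldl_append, List.map_append, List.flatten_append]
    simp [ih, String.toList_append]

theorem flatten_join (sep : List Char) : ∀ (cs : List (List Char)), cs ≠ [] →
    (cs.map (fun c => c ++ sep)).flatten = PySem.Chars.join sep cs ++ sep
  | [], h => absurd rfl h
  | [c], _ => by simp [PySem.Chars.join_singleton]
  | c :: c' :: t, _ => by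
    rw [List.map_cons, List.flatten_cons, flatten_join sep (c' :: t) (by simp),
      PySem.Chars.join_cons_cons]
    simp [List.append_assoc]

theorem cells_eq (arr : List Int) (colors : List String) (h : colors.length = arr.length) :
    ((colors.zip arr).map (fun cv =>
        "\\cellcolor{" ++ cv.1 ++ "}" ++ PySem.Int.toStr cv.2)).map String.toList
    = (List.range arr.length).map (fun (k : Nat) =>
        ("\\cellcolor{" ++ PySem.List.pyGetD colors (k : Int) "" ++ "}" ++
          PySem.Int.toStr (PySem.List.pyGetD arr (k : Int) 0)).toList) := by
  apply List.ext_getElem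
  · simp [h]
  · intro k h1 h2
    simp only [List.getElem_map, List.getElem_zip, List.getElem_range,
      PySem.List.pyGetD_natCast]
    have hk : k < arr.length := by simpa using h2
    rw [List.getD_eq_getElem _ _ (by omega), List.getD_eq_getElem _ _ (by omega)]

-- A's generic table renderer agrees with B's join/zip renderer given the same colors
theorem row_eq (arr : List Int) (i j left right : Int) (colors : List String)
    (hne : arr ≠ [])
    (hcol : (if j = right + 1 then
      (List.range arr.length).map (fun (k : Nat) =>
        if left > (k : Int) ∨ (k : Int) > right then "yellow!30"
        else if left ≤ (k : Int) ∧ (k : Int) < i then "green!30"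
        else if (k : Int) = i ∧ ¬(i = -1 ∧ j = -1) then "gray!30"
        else if i < (k : Int) ∧ (k : Int) ≤ right then "red!30"
        else "white")
    else
      (List.range arr.length).map (fun (k : Nat) =>
        if (k : Int) = right ∧ ¬(i = -1 ∧ j = -1) then "gray!30"
        else if left > (k : Int) ∨ (k : Int) > right then "yellow!30"
        else if left ≤ (k : Int) ∧ (k : Int) ≤ i then "green!30"
        else if i < (k : Int) ∧ (k : Int) ≤ j then "red!30"
        else "white")) = colors) :
    texPartitionString arr i j left right = texRow arr colors := by
  have hclen : colors.length = arr.length := by rw [← hcol]; split_ifs <;> simp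
  unfold texPartitionString
  dsimp only
  rw [hcol]
  have hn : 1 ≤ arr.length := List.length_pos_of_ne_nil hne
  apply String.toList_inj.mp
  simp only [texRow, String.toList_append, PySem.Str.toList_slice, PySem.Str.toList_join]
  rw [foldl_cells arr.length (fun k => PySem.List.pyGetD colors (k : Int) "")
      (fun k => PySem.Int.toStr (PySem.List.pyGetD arr (k : Int) 0))]
  rw [cells_eq arr colors hclen]
  have hflat := flatten_join " &\n".toList
    ((List.range arr.length).map (fun (k : Nat) =>
      ("\\cellcolor{" ++ PySem.List.pyGetD colors (k : Int) "" ++ "}" ++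
        PySem.Int.toStr (PySem.List.pyGetD arr (k : Int) 0)).toList))
    (by simp; omega)
  rw [List.map_map] at hflat
  simp only [Function.comp_def] at hflat
  rw [hflat]
  set H : List Char := ("\\begin{tabular}{" ++ String.ofList (PySem.List.pyRepeat "|l".toList (arr.length : Int)) ++ "|" ++ "}\n\\hline\n").toList with hH
  set J : List Char := PySem.Chars.join " &\n".toList
    ((List.range arr.length).map (fun (k : Nat) =>
      ("\\cellcolor{" ++ PySem.List.pyGetD colors (k : Int) "" ++ "}" ++
        PySem.Int.toStr (PySem.List.pyGetD arr (k : Int) 0)).toList)) with hJ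
  have hgrp : H ++ (J ++ " &\n".toList) = (H ++ J ++ [' ']) ++ ['&', '\n'] := by
    simp [List.append_assoc]
  rw [hgrp]
  have htake : PySem.Chars.slice ((H ++ J ++ [' ']) ++ ['&', '\n']) none (some (-2))
      = H ++ J ++ [' '] := by
    have := PySem.List.slice_to_neg_ofNat ((H ++ J ++ [' ']) ++ ['&', '\n']) 2 (by omega)
    rw [show PySem.Chars.slice ((H ++ J ++ [' ']) ++ ['&', '\n']) none (some (-2))
        = PySem.List.slice ((H ++ J ++ [' ']) ++ ['&', '\n']) none (some (-2)) from rfl,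
      this]
    exact List.take_left' (by simp; omega)
  rw [htake]
  rw [hH]
  simp [String.toList_append, List.append_assoc]


-- the plain wrapper row = A's (-1,-1) render
theorem plain_eq (arr : List Int) (hne : arr ≠ []) :
    texPartitionString arr (-1) (-1) 0 ((arr.length : Int) - 1) = texPlain arr := by
  have hn : 1 ≤ arr.length := List.length_pos_of_ne_nil hne
  unfold texPlain
  apply row_eq _ _ _ _ _ _ hne
  rw [if_neg (by omega), PySem.List.pyRepeat_singleton]
  have h2 : ((arr.length : Int)).toNat = arr.length := by omega
  rw [h2]
  apply List.ext_getElem (by simp)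
  intro k _ h2
  have hk : k < arr.length := by simp only [List.length_replicate] at h2; exact h2
  simp only [List.getElem_map, List.getElem_range, List.getElem_replicate]
  split_ifs <;> first | rfl | (exfalso; omega) | simp_all

-- the post-partition render = B's texFinal, within bounds
theorem final_eq (arr : List Int) (pivot left right : Int) (hne : arr ≠ [])
    (_h0 : 0 ≤ left) (_hlp : left ≤ pivot) (hpr : pivot ≤ right) :
    texPartitionString arr pivot (right + 1) left right = texFinal arr pivot left right := by
  unfold texFinal
  apply row_eq _ _ _ _ _ _ hne
  rw [if_pos rfl]
  apply List.map_congr_left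
  intro k hk
  have hk' : k < arr.length := List.mem_range.mp hk
  unfold texFinalColor
  split_ifs <;> first | rfl | (exfalso; omega)

-- A's partition foldl and B's agree on the (arr, i) components
theorem foldl_partStep_proj (x left right : Int) :
    ∀ (L : List Int) (s : List Int × Int × List String),
      ((L.foldl (texPartStep x left right) s).1, (L.foldl (texPartStep x left right) s).2.1)
        = L.foldl (partStepB x) (s.1, s.2.1)
  | [], _ => rfl
  | j :: L, s => by
      rw [List.foldl_cons, List.foldl_cons]
      have hstep : ((texPartStep x left right s j).1, (texPartStep x left right s j).2.1)
          = partStepB x (s.1, s.2.1) j := by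
        unfold texPartStep partStepB
        by_cases hc : PySem.List.pyGetD s.1 j 0 ≤ x <;> simp [hc]
      rw [foldl_partStep_proj x left right L, hstep]

theorem partition_proj (arr : List Int) (left right : Int) :
    ((texPartition arr left right).2.1, (texPartition arr left right).1)
      = partitionB arr left right := by
  unfold texPartition partitionB
  have h := foldl_partStep_proj (PySem.List.pyGetD arr right 0) left right
    (PySem.List.pyRange left right)
    (arr, left - 1, [texPartitionString arr (-1) (-1) left right])
  simp only []
  rw [← h]

-- subProcedure[-1] is the final-state render
theorem texPartition_last (arr : List Int) (left right : Int) :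
    PySem.List.pyGetD (texPartition arr left right).2.2 (-1) ""
      = texPartitionString (texPartition arr left right).2.1 (texPartition arr left right).1
          (right + 1) left right := by
  have hlast : ∀ (L : List String) (x : String),
      PySem.List.pyGetD (L ++ [x]) (-1) "" = x := by
    intro L x; simp [PySem.List.pyGetD]
  unfold texPartition
  simp only []
  rw [hlast]

theorem foldl_partStepB_i_bounds (x : Int) :
    ∀ (L : List Int) (s : List Int × Int),
      s.2 ≤ (L.foldl (partStepB x) s).2 ∧ (L.foldl (partStepB x) s).2 ≤ s.2 + L.length
  | [], s => by simp
  | j :: L, s => by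
      rw [List.foldl_cons]
      have hstep : (partStepB x s j).2 = s.2 ∨ (partStepB x s j).2 = s.2 + 1 := by
        unfold partStepB
        by_cases hc : PySem.List.pyGetD s.1 j 0 ≤ x <;> simp [hc]
      have ih := foldl_partStepB_i_bounds x L (partStepB x s j)
      rw [List.length_cons]
      omega

theorem pyRange_one_nil (a b : Int) (h : b ≤ a) : PySem.List.pyRange a b = [] := by
  simp [PySem.List.pyRange]; omega

theorem length_pyRange_one : ∀ (n : Nat) (a b : Int), (b - a).toNat = n →
    (PySem.List.pyRange a b).length = n
  | 0, a, b, h => by rw [pyRange_one_nil a b (by omega)]; rfl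
  | n + 1, a, b, h => by
      rw [PySem.List.pyRange_one_cons (by omega), List.length_cons,
        length_pyRange_one n (a + 1) b (by omega)]

-- B's pivot lies in [left, left + max 0 (right-left)]
theorem partitionB_pivot_bounds (arr : List Int) (left right : Int) :
    left ≤ (partitionB arr left right).2 ∧
    (partitionB arr left right).2 ≤ left + ((right - left).toNat : Int) := by
  have hb := foldl_partStepB_i_bounds (PySem.List.pyGetD arr right 0)
    (PySem.List.pyRange left right) (arr, left - 1)
  have hlen := length_pyRange_one (right - left).toNat left right rfl
  rw [hlen] at hb
  simp only [partitionB]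
  dsimp only at hb ⊢
  omega

-- partitionB preserves the array's length
theorem foldl_partStepB_length (x : Int) :
    ∀ (L : List Int) (s : List Int × Int),
      (L.foldl (partStepB x) s).1.length = s.1.length
  | [], _ => rfl
  | j :: L, s => by
      rw [List.foldl_cons, foldl_partStepB_length x L]
      unfold partStepB
      by_cases hc : PySem.List.pyGetD s.1 j 0 ≤ x <;>
        simp [hc, PySem.List.length_pySetD]

theorem partitionB_length (arr : List Int) (left right : Int) :
    (partitionB arr left right).1.length = arr.length := by
  unfold partitionB
  dsimp only
  rw [PySem.List.length_pySetD, PySem.List.length_pySetD, foldl_partStepB_length]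

-- the pushed sub-ranges weigh strictly less than the popped range
theorem texQSFuel_cons (a b : Int) (rest : List (Int × Int)) :
    texQSFuel ((a, b) :: rest) = 3 ^ ((b - a + 1).toNat) + texQSFuel rest := by
  simp [texQSFuel]

theorem texQSFuel_dec (left right : Int) (rest : List (Int × Int)) (arr : List Int) :
    texQSFuel ((if left < (texPartition arr left right).1 - 1 then
          [(left, (texPartition arr left right).1 - 1)] else []) ++
        (if (texPartition arr left right).1 + 1 < right then
          [((texPartition arr left right).1 + 1, right)] else []) ++ rest) <
      texQSFuel ((left, right) :: rest) := by
  have hpb := partitionB_pivot_bounds arr left right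
  have hproj := partition_proj arr left right
  have h : left ≤ (texPartition arr left right).1 ∧
      (texPartition arr left right).1 ≤ left + ((right - left).toNat : Int) := by
    have := congrArg Prod.snd hproj
    dsimp at this
    omega
  simp only [texQSFuel, List.map_append, List.sum_append, List.map_cons, List.sum_cons]
  rcases Nat.lt_or_ge ((right - left + 1).toNat) 1 with hs | hs
  · have hp : (texPartition arr left right).1 = left := by omega
    split_ifs with h1 h2 h2 <;> simp_all <;> omega
  · have hb : 3 ^ ((right - left).toNat) + 3 ^ ((right - left).toNat) <
        3 ^ ((right - left + 1).toNat) := by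
      have : (right - left + 1).toNat = (right - left).toNat + 1 := by omega
      rw [this, pow_succ]
      nlinarith [Nat.one_le_pow ((right - left).toNat) 3 (by norm_num)]
    have m1 : 3 ^ (((texPartition arr left right).1 - 1 - left + 1).toNat) ≤
        3 ^ ((right - left).toNat) := Nat.pow_le_pow_right (by norm_num) (by omega)
    have m2 : 3 ^ ((right - ((texPartition arr left right).1 + 1) + 1).toNat) ≤
        3 ^ ((right - left).toNat) := Nat.pow_le_pow_right (by norm_num) (by omega)
    have hone : 1 ≤ 3 ^ ((right - left).toNat) := Nat.one_le_pow _ 3 (by norm_num)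
    split_ifs with h1 h2 h2 <;> simp only [List.map_cons, List.sum_cons, List.map_nil,
      List.sum_nil] <;> omega

theorem texQSLoop_nil (f : Nat) (arr : List Int) (proc : List String) :
    texQSLoop f [] arr proc = (arr, proc) := by
  cases f <;> rfl

-- any two sufficient fuels run A's loop to the same result
theorem texQSLoop_fuel_irrel : ∀ (f g : Nat) (stack : List (Int × Int)) (arr : List Int)
    (proc : List String), texQSFuel stack ≤ f → texQSFuel stack ≤ g →
    texQSLoop f stack arr proc = texQSLoop g stack arr proc := by
  intro f
  induction f with
  | zero =>
    intro g stack arr proc hf hg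
    cases stack with
    | nil => rw [texQSLoop_nil, texQSLoop_nil]
    | cons hd tl =>
      exfalso
      obtain ⟨a, b⟩ := hd
      have h1 : 1 ≤ 3 ^ ((b - a + 1).toNat) := Nat.one_le_pow _ 3 (by norm_num)
      have hc := texQSFuel_cons a b tl
      omega
  | succ f ih =>
    intro g stack arr proc hf hg
    cases stack with
    | nil => rw [texQSLoop_nil, texQSLoop_nil]
    | cons hd tl =>
      obtain ⟨left, right⟩ := hd
      have h1 : 1 ≤ 3 ^ ((right - left + 1).toNat) := Nat.one_le_pow _ 3 (by norm_num)
      have hc := texQSFuel_cons left right tl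
      have hdec := texQSFuel_dec left right tl arr
      cases g with
      | zero => omega
      | succ g =>
        rw [texQSLoop, texQSLoop]
        exact ih g _ _ _ (by omega) (by omega)

-- B's recursion preserves the array's length
theorem texQSRecB_length : ∀ (f : Nat) (l r : Int) (arr : List Int) (proc : List String),
    (texQSRecB f l r arr proc).1.length = arr.length
  | 0, _, _, _, _ => rfl
  | f + 1, l, r, arr, proc => by
      rw [texQSRecB]
      have hp := partitionB_length arr l r
      split_ifs <;> simp [texQSRecB_length f, hp]

-- the LIFO stack processes exactly the preorder B's recursion produces
theorem texQSLoop_cons_aux : ∀ (N f g : Nat) (left right : Int) (rest : List (Int × Int))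
    (arr : List Int) (proc : List String),
    texQSFuel ((left, right) :: rest) ≤ N → texQSFuel ((left, right) :: rest) ≤ f →
    (right - left).toNat < g → arr ≠ [] → 0 ≤ left → left ≤ right →
    texQSLoop f ((left, right) :: rest) arr proc =
      texQSLoop f rest (texQSRecB g left right arr proc).1 (texQSRecB g left right arr proc).2 := by
  intro N
  induction N with
  | zero =>
    intro f g left right rest arr proc hN hf hg hne h0 hlr
    exfalso
    have h1 : 1 ≤ 3 ^ ((right - left + 1).toNat) := Nat.one_le_pow _ 3 (by norm_num)
    have hc := texQSFuel_cons left right rest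
    omega
  | succ N ih =>
    intro f g left right rest arr proc hN hf hg hne h0 hlr
    have h1 : 1 ≤ 3 ^ ((right - left + 1).toNat) := Nat.one_le_pow _ 3 (by norm_num)
    have hc0 := texQSFuel_cons left right rest
    have hdec := texQSFuel_dec left right rest arr
    have hproj := partition_proj arr left right
    have hpbB := partitionB_pivot_bounds arr left right
    have hplenB := partitionB_length arr left right
    have hlast := texPartition_last arr left right
    rw [← hproj] at hpbB hplenB
    dsimp only at hpbB hplenB
    have hpr : (texPartition arr left right).1 ≤ right := by omega
    have hnep : (texPartition arr left right).2.1 ≠ [] := by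
      intro hcn
      rw [hcn] at hplenB
      cases arr with
      | nil => exact hne rfl
      | cons a l => simp at hplenB
    have hfin : texFinal (texPartition arr left right).2.1 (texPartition arr left right).1
        left right = PySem.List.pyGetD (texPartition arr left right).2.2 (-1) "" := by
      rw [hlast]
      exact (final_eq _ _ _ _ hnep h0 hpbB.1 hpr).symm
    cases f with
    | zero => omega
    | succ f =>
    cases g with
    | zero => omega
    | succ g =>
      rw [texQSLoop, texQSRecB]
      rw [← hproj]
      dsimp only
      rw [hfin]
      generalize hT : texPartition arr left right = t at hpbB hplenB hnep hdec ⊢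
      obtain ⟨p, ta, tp⟩ := t
      dsimp only at hpbB hplenB hnep hdec ⊢
      by_cases hL : left < p - 1 <;> by_cases hR : p + 1 < right <;>
        simp only [hL, hR, ite_true, ite_false, List.cons_append, List.nil_append] at hdec ⊢
      · -- both children: left child first, then right child
        have hc1 := texQSFuel_cons left (p - 1) ((p + 1, right) :: rest)
        have hc2 := texQSFuel_cons (p + 1) right rest
        have hp1 : 1 ≤ 3 ^ ((p - 1 - left + 1).toNat) := Nat.one_le_pow _ 3 (by norm_num)
        have hp2 : 1 ≤ 3 ^ ((right - (p + 1) + 1).toNat) := Nat.one_le_pow _ 3 (by norm_num)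
        have hlenL := texQSRecB_length g left (p - 1) ta
          (proc ++ [PySem.List.pyGetD tp (-1) ""])
        have hneL : (texQSRecB g left (p - 1) ta (proc ++ [PySem.List.pyGetD tp (-1) ""])).1 ≠ [] := by
          intro hcn
          rw [hcn] at hlenL
          cases ta with
          | nil => exact hnep rfl
          | cons a l => simp at hlenL
        rw [ih f g left (p - 1) ((p + 1, right) :: rest) _ _ (by omega) (by omega) (by omega)
          hnep h0 (by omega)]
        rw [ih f g (p + 1) right rest _ _ (by omega) (by omega) (by omega) hneL (by omega) (by omega)]
        exact texQSLoop_fuel_irrel f (f + 1) rest _ _ (by omega) (by omega)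
      · -- left child only
        have hc1 := texQSFuel_cons left (p - 1) rest
        have hp1 : 1 ≤ 3 ^ ((p - 1 - left + 1).toNat) := Nat.one_le_pow _ 3 (by norm_num)
        rw [ih f g left (p - 1) rest _ _ (by omega) (by omega) (by omega) hnep h0 (by omega)]
        exact texQSLoop_fuel_irrel f (f + 1) rest _ _ (by omega) (by omega)
      · -- right child only
        have hc2 := texQSFuel_cons (p + 1) right rest
        have hp2 : 1 ≤ 3 ^ ((right - (p + 1) + 1).toNat) := Nat.one_le_pow _ 3 (by norm_num)
        rw [ih f g (p + 1) right rest _ _ (by omega) (by omega) (by omega) hnep (by omega) (by omega)]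
        exact texQSLoop_fuel_irrel f (f + 1) rest _ _ (by omega) (by omega)
      · -- no children
        exact texQSLoop_fuel_irrel f (f + 1) rest _ _ (by omega) (by omega)

-- ===== VERDICT (by name: the statement is the Claim_ definition above) =====
theorem TeXQuickSort_spec : Claim_equal_TeXQuickSort := by
  intro arr _ hpre
  unfold Spec_TeXQuickSort TeXQuickSort TeXQuickSort_alt
  have hlen : 1 ≤ arr.length := by
    cases arr with
    | nil => exact absurd rfl hpre
    | cons a l => simp
  rw [plain_eq arr hpre]
  rw [texQSLoop_cons_aux (texQSFuel [((0 : Int), (arr.length : Int) - 1)])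
    (texQSFuel [((0 : Int), (arr.length : Int) - 1)]) (((arr.length : Int) - 1).toNat + 1)
    0 ((arr.length : Int) - 1) [] arr [texPlain arr]
    (le_refl _) (le_refl _) (by omega) hpre (by omega) (by omega)]
  rw [texQSLoop_nil]
  simp only []
  have hne' : (texQSRecB (((arr.length : Int) - 1).toNat + 1) 0 ((arr.length : Int) - 1) arr
      [texPlain arr]).1 ≠ [] := by
    have := texQSRecB_length (((arr.length : Int) - 1).toNat + 1) 0 ((arr.length : Int) - 1)
      arr [texPlain arr]
    intro hc
    rw [hc] at this
    simp at this
    omega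
  rw [plain_eq _ hne', finalStringB_eq]
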